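-- pv_equiv track=rewrite | github.com/endomorphosis/ipfs_datasets_py | ipfs_datasets_py/logic/integration/external_provers.py | _extract_proof
-- ===== SOURCE A (Python) =====
-- from typing import Optional, Dict, Any, List
--
-- def _extract_proof(output: str) -> Optional[str]:
--     """Extract proof from Vampire output."""
--     lines = output.split('\n')
--     proof_lines = []
--     in_proof = False
--
--     for line in lines:
--         if 'Proof' in line or 'Refutation' in line:
--             in_proof = True
--         if in_proof:
--             proof_lines.append(line)
--         if in_proof and ('Success' in line or 'PROVED' in line):
--             break
--
--     return '\n'.join(proof_lines) if proof_lines else None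
-- ===== SOURCE B (Python) =====
-- def _extract_proof(output):
--     """Extract proof from Vampire output (find-then-slice)."""
--     lines = output.split('\n')
--     for i, line in enumerate(lines):
--         if 'Proof' in line or 'Refutation' in line:
--             tail = lines[i:]
--             for j, l2 in enumerate(tail):
--                 if 'Success' in l2 or 'PROVED' in l2:
--                     return '\n'.join(tail[:j + 1])
--             return '\n'.join(tail)
--     return None
-- ===== Notes on version B (the rewrite author's own statement) =====
-- stated objective: alternative
-- what changed: Replaced the streaming in_proof flag and accumulator list with a find-the-start-line scan followed by slicing the tail up to the first terminator line (inclusive), defaulting to the whole tail.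
import Mathlib
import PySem

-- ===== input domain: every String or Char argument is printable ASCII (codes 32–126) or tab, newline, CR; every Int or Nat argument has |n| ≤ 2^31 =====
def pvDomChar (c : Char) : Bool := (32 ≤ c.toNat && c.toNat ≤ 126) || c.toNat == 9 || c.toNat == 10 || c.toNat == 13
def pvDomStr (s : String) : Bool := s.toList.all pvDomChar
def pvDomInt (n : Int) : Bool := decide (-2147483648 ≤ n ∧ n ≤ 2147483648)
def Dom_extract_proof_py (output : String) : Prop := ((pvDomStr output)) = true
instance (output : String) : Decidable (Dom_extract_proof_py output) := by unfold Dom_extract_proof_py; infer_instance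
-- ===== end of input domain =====

-- B replaces A's streaming in_proof flag with find-the-start-line then slice-to-terminator; alternative decomposition, same cost.

-- lines = output.split('\n')  ('\n' is never empty, so split? never returns none)
def pyLines (s : String) : List String := (PySem.Str.split? s "\n").getD []

-- shared line predicates ('Proof'/'Refutation' starts a proof block, 'Success'/'PROVED' ends it)
def hasStartMark (l : String) : Bool := PySem.Str.isIn "Proof" l || PySem.Str.isIn "Refutation" l
def hasTermMark (l : String) : Bool := PySem.Str.isIn "Success" l || PySem.Str.isIn "PROVED" l

-- ===== PORT A =====
-- the for-loop with proof_lines / in_proof state and break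
def loopA : List String → List String → Bool → List String
  | [], acc, _ => acc
  | l :: ls, acc, inp =>
    let inp' := if hasStartMark l then true else inp
    let acc' := if inp' then acc ++ [l] else acc
    if inp' && hasTermMark l then acc' else loopA ls acc' inp'

def extract_proof_py (output : String) : Option String :=
  let pl := loopA (pyLines output) [] false
  if pl = [] then none else some (PySem.Str.join "\n" pl)

-- ===== PORT B =====
-- inner loop: enumerate(tail) looking for a terminator, slicing tail[:j+1]
def altInner (tail : List String) (j : Nat) : List String → String
  | [] => PySem.Str.join "\n" tail
  | l :: ls => if hasTermMark l then PySem.Str.join "\n" (tail.take (j + 1)) else altInner tail (j + 1) ls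

-- outer loop: enumerate(lines) looking for the start line; tail = lines[i:]
def altOuter : List String → Option String
  | [] => none
  | l :: ls => if hasStartMark l then some (altInner (l :: ls) 0 (l :: ls)) else altOuter ls

def extract_proof_py_alt (output : String) : Option String :=
  altOuter (pyLines output)

-- ===== PRECONDITION & SPEC =====
def Spec_extract_proof_py (output : String) (out : Option String) : Prop := out = extract_proof_py_alt output
instance (output : String) (out : Option String) : Decidable (Spec_extract_proof_py output out) := by unfold Spec_extract_proof_py; infer_instance

-- ===== CLAIM (what is proved, stated in full; the proofs are below) =====
def Claim_equal_extract_proof_py : Prop := ∀ (output : String), Dom_extract_proof_py output → Spec_extract_proof_py output (extract_proof_py output)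

-- ===== LEMMAS AND PROOFS =====

-- the common value both loops compute once a start line is reached: lines up to and including the first terminator, else all
def upto : List String → List String
  | [] => []
  | l :: ls => if hasTermMark l then [l] else l :: upto ls

theorem loopA_true (ls : List String) : ∀ acc, loopA ls acc true = acc ++ upto ls := by
  induction ls with
  | nil => intro acc; simp [loopA, upto]
  | cons l ls ih =>
    intro acc
    by_cases h : hasTermMark l = true <;> simp [loopA, upto, h, ih]

theorem altInner_eq (rem : List String) : ∀ pre : List String,
    altInner (pre ++ rem) pre.length rem = PySem.Str.join "\n" (pre ++ upto rem) := by
  induction rem with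
  | nil => intro pre; simp [altInner, upto]
  | cons l ls ih =>
    intro pre
    by_cases h : hasTermMark l = true
    · have ht : (pre ++ l :: ls).take (pre.length + 1) = pre ++ [l] := by
        have : pre ++ l :: ls = (pre ++ [l]) ++ ls := by simp
        rw [this, List.take_left' (by simp)]
      simp [altInner, upto, h, ht]
    · have := ih (pre ++ [l])
      simp only [List.append_assoc, List.singleton_append, List.length_append,
        List.length_singleton] at this
      simp [altInner, upto, h, this]

theorem upto_cons_ne_nil (l : String) (ls : List String) : upto (l :: ls) ≠ [] := by
  by_cases h : hasTermMark l = true <;> simp [upto, h]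

theorem main_eq (ls : List String) :
    (if loopA ls [] false = [] then none else some (PySem.Str.join "\n" (loopA ls [] false)))
      = altOuter ls := by
  induction ls with
  | nil => simp [loopA, altOuter]
  | cons l ls ih =>
    by_cases hs : hasStartMark l = true
    · have hA : loopA (l :: ls) [] false = upto (l :: ls) := by
        by_cases ht : hasTermMark l = true <;>
          simp [loopA, hs, ht, upto, loopA_true]
      have hB := altInner_eq (l :: ls) []
      simp only [List.nil_append, List.length_nil] at hB
      simp [altOuter, hs, hA, hB, upto_cons_ne_nil]
    · have hA : loopA (l :: ls) [] false = loopA ls [] false := by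
        simp [loopA, hs]
      simp [altOuter, hs, hA, ih]

-- ===== VERDICT (by name: the statement is the Claim_ definition above) =====
theorem extract_proof_py_spec : Claim_equal_extract_proof_py := by
  intro output _
  unfold Spec_extract_proof_py extract_proof_py extract_proof_py_alt
  exact main_eq (pyLines output)
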